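-- pv_equiv track=rewrite | github.com/AkashSri28/Leetcode-Solved-Questions | 2050-count-good-numbers/2050-count-good-numbers.py | countGoodNumbers
-- ===== SOURCE A (Python) =====
-- def countGoodNumbers(n: int) -> int:
--     MOD = 10**9+7
--     def power(base, exp):
--         s = 1
--         base %= MOD
--
--         while exp > 0:
--             if exp % 2 == 1:
--                 s = (s*base)%MOD
--             base = (base*base)%MOD
--             exp //= 2
--
--         return s
--
--     even = (n+1)//2
--     odd = n//2
--
--     even_cnt = power(5, even)
--     odd_cnt = power(4, odd)
--
--     return (even_cnt*odd_cnt)%MOD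
-- ===== SOURCE B (Python) =====
-- def countGoodNumbers(n: int) -> int:
--     MOD = 10**9 + 7
--
--     def power(base, exp):
--         if exp <= 0:
--             return 1
--         half = power(base, exp // 2)
--         r = (half * half) % MOD
--         if exp % 2 == 1:
--             r = (r * (base % MOD)) % MOD
--         return r
--
--     return (power(5, (n + 1) // 2) * power(4, n // 2)) % MOD
-- ===== Notes on version B (the rewrite author's own statement) =====
-- stated objective: alternative
-- what changed: The iterative while-loop exponentiation accumulator (square the base, halve the exponent, multiply into s on odd bits) is replaced by recursive divide-and-conquer fast exponentiation: power recurses on the halved exponent, squares the returned half, and multiplies in the reduced base once when the exponent is odd.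
import Mathlib
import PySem

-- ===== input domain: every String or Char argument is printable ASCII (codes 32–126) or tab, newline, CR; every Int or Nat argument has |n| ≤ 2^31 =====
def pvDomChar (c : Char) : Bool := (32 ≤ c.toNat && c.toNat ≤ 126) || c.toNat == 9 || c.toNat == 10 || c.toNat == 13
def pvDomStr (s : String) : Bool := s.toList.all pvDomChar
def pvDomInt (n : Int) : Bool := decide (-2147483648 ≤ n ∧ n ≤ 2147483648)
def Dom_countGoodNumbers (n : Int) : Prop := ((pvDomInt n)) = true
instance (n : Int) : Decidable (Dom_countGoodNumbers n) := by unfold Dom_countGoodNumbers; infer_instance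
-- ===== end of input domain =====

-- B replaces A's iterative while-loop exponentiation accumulator with recursive
-- divide-and-conquer fast exponentiation (recursion on the halved exponent); same cost, different decomposition.


def pvMOD : Int := 1000000007

-- ===== PORT A =====
-- A's inner `power`: the while-loop as structural recursion on the same state (s, base, exp);
-- the `base %= MOD` line is applied by the caller below, as in A.
def pvPowLoopA (s base exp : Int) : Int :=
  if h : 0 < exp then
    pvPowLoopA (if PySem.Int.mod exp 2 = 1 then PySem.Int.mod (s * base) pvMOD else s)
               (PySem.Int.mod (base * base) pvMOD)
               (PySem.Int.floordiv exp 2)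
  else s
termination_by exp.toNat
decreasing_by
  have h2 : PySem.Int.floordiv exp 2 = exp / 2 := PySem.Int.floordiv_eq_ediv_of_pos (by omega)
  rw [h2]; omega

def countGoodNumbers (n : Int) : Int :=
  let even := PySem.Int.floordiv (n + 1) 2
  let odd := PySem.Int.floordiv n 2
  let even_cnt := pvPowLoopA 1 (PySem.Int.mod 5 pvMOD) even
  let odd_cnt := pvPowLoopA 1 (PySem.Int.mod 4 pvMOD) odd
  PySem.Int.mod (even_cnt * odd_cnt) pvMOD

-- ===== PORT B =====
-- B's inner `power`: recursive fast exponentiation on exp // 2.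
def pvPowRecB (base exp : Int) : Int :=
  if h : exp ≤ 0 then 1
  else
    let half := pvPowRecB base (PySem.Int.floordiv exp 2)
    let r := PySem.Int.mod (half * half) pvMOD
    if PySem.Int.mod exp 2 = 1 then PySem.Int.mod (r * PySem.Int.mod base pvMOD) pvMOD else r
termination_by exp.toNat
decreasing_by
  have h2 : PySem.Int.floordiv exp 2 = exp / 2 := PySem.Int.floordiv_eq_ediv_of_pos (by omega)
  rw [h2]; omega

def countGoodNumbers_alt (n : Int) : Int :=
  PySem.Int.mod (pvPowRecB 5 (PySem.Int.floordiv (n + 1) 2) * pvPowRecB 4 (PySem.Int.floordiv n 2)) pvMOD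

-- ===== PRECONDITION & SPEC =====
def Spec_countGoodNumbers (n : Int) (out : Int) : Prop := out = countGoodNumbers_alt n
instance (n : Int) (out : Int) : Decidable (Spec_countGoodNumbers n out) := by unfold Spec_countGoodNumbers; infer_instance

-- ===== CLAIM (what is proved, stated in full; the proofs are below) =====
def Claim_equal_countGoodNumbers : Prop := ∀ (n : Int), Dom_countGoodNumbers n → Spec_countGoodNumbers n (countGoodNumbers n)

-- ===== LEMMAS AND PROOFS =====

theorem pvMOD_pos : (0 : Int) < pvMOD := by norm_num [pvMOD]

-- a % MOD is congruent to a
theorem pvSelf (a : Int) : a % pvMOD ≡ a [ZMOD pvMOD] := Int.emod_emod_of_dvd a dvd_rfl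

-- B's recursion computes base ^ exp mod MOD (for 0 <= exp).
theorem pvPowRecB_eq (base : Int) : ∀ (k : Nat) (e : Int), 0 ≤ e → e.toNat = k →
    pvPowRecB base e = base ^ k % pvMOD := by
  intro k
  induction k using Nat.strong_induction_on with
  | _ k ih =>
    intro e he hk
    rw [pvPowRecB]
    by_cases h0 : e ≤ 0
    · rw [dif_pos h0]
      have : k = 0 := by omega
      subst this
      norm_num [pvMOD]
    · rw [dif_neg h0]
      have hpos : 0 < e := by omega
      have hfd : PySem.Int.floordiv e 2 = e / 2 := PySem.Int.floordiv_eq_ediv_of_pos (by omega)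
      have hmd : PySem.Int.mod e 2 = e % 2 := PySem.Int.mod_eq_emod_of_pos (by omega)
      have hM2 : ∀ x : Int, PySem.Int.mod x pvMOD = x % pvMOD := fun x => PySem.Int.mod_eq_emod_of_pos pvMOD_pos
      have hih := ih (e / 2).toNat (by omega) (e / 2) (by omega) rfl
      simp only [hfd, hmd, hM2, hih]
      have hsq : base ^ (e / 2).toNat % pvMOD * (base ^ (e / 2).toNat % pvMOD) % pvMOD
          ≡ base ^ (e / 2).toNat * base ^ (e / 2).toNat [ZMOD pvMOD] :=
        (pvSelf _).trans ((pvSelf _).mul (pvSelf _))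
      by_cases hodd : e % 2 = 1
      · rw [if_pos hodd]
        have hk3 : k = (e / 2).toNat + (e / 2).toNat + 1 := by omega
        rw [hk3]
        exact calc
          base ^ (e / 2).toNat % pvMOD * (base ^ (e / 2).toNat % pvMOD) % pvMOD * (base % pvMOD)
              ≡ base ^ (e / 2).toNat * base ^ (e / 2).toNat * base [ZMOD pvMOD] := hsq.mul (pvSelf base)
          _ = base ^ ((e / 2).toNat + (e / 2).toNat + 1) := by ring
      · rw [if_neg hodd]
        have hk2 : k = (e / 2).toNat + (e / 2).toNat := by omega
        rw [hk2]
        exact calc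
          base ^ (e / 2).toNat % pvMOD * (base ^ (e / 2).toNat % pvMOD)
              ≡ base ^ (e / 2).toNat * base ^ (e / 2).toNat [ZMOD pvMOD] := (pvSelf _).mul (pvSelf _)
          _ = base ^ ((e / 2).toNat + (e / 2).toNat) := by rw [← pow_add]

-- A's loop invariant: with reduced s, the loop on base b % MOD computes s * b ^ exp mod MOD.
theorem pvPowLoopA_eq : ∀ (k : Nat) (s b e : Int), 0 ≤ s → s < pvMOD →
    0 ≤ e → e.toNat = k → pvPowLoopA s (b % pvMOD) e = s * b ^ k % pvMOD := by
  intro k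
  induction k using Nat.strong_induction_on with
  | _ k ih =>
    intro s b e hs hslt he hk
    rw [pvPowLoopA]
    by_cases hpos : 0 < e
    · rw [dif_pos hpos]
      have hfd : PySem.Int.floordiv e 2 = e / 2 := PySem.Int.floordiv_eq_ediv_of_pos (by omega)
      have hmd : PySem.Int.mod e 2 = e % 2 := PySem.Int.mod_eq_emod_of_pos (by omega)
      have hM2 : ∀ x : Int, PySem.Int.mod x pvMOD = x % pvMOD := fun x => PySem.Int.mod_eq_emod_of_pos pvMOD_pos
      have hbb : b % pvMOD * (b % pvMOD) % pvMOD = b * b % pvMOD := (Int.mul_emod b b pvMOD).symm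
      simp only [hfd, hmd, hM2, hbb]
      by_cases hodd : e % 2 = 1
      · rw [if_pos hodd]
        have hslo : 0 ≤ s * (b % pvMOD) % pvMOD := Int.emod_nonneg _ (by norm_num [pvMOD])
        have hshi : s * (b % pvMOD) % pvMOD < pvMOD := Int.emod_lt_of_pos _ pvMOD_pos
        rw [ih (e / 2).toNat (by omega) _ (b * b) _ hslo hshi (by omega) rfl]
        have hk3 : k = (e / 2).toNat + (e / 2).toNat + 1 := by omega
        rw [hk3]
        exact calc
          s * (b % pvMOD) % pvMOD * (b * b) ^ (e / 2).toNat
              ≡ s * b * (b * b) ^ (e / 2).toNat [ZMOD pvMOD] :=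
            (((pvSelf _).trans ((Int.ModEq.refl s).mul (pvSelf b))).mul (Int.ModEq.refl _))
          _ = s * b ^ ((e / 2).toNat + (e / 2).toNat + 1) := by ring
      · rw [if_neg hodd]
        rw [ih (e / 2).toNat (by omega) _ (b * b) _ hs hslt (by omega) rfl]
        have hk2 : k = (e / 2).toNat + (e / 2).toNat := by omega
        rw [hk2]
        congr 1
        ring
    · rw [dif_neg hpos]
      have : k = 0 := by omega
      subst this
      simp [Int.emod_eq_of_lt hs hslt]

-- bridge: A's power(b, e) (reduce base, then loop) = B's power(b, e) (recursive)
theorem pvPow_bridge (b e : Int) : pvPowLoopA 1 (PySem.Int.mod b pvMOD) e = pvPowRecB b e := by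
  have hM : PySem.Int.mod b pvMOD = b % pvMOD := PySem.Int.mod_eq_emod_of_pos pvMOD_pos
  by_cases he : 0 ≤ e
  · rw [hM, pvPowLoopA_eq e.toNat 1 b e (by norm_num) (by norm_num [pvMOD]) he rfl,
      pvPowRecB_eq b e.toNat e he rfl, one_mul]
  · rw [pvPowLoopA, pvPowRecB]
    rw [dif_neg (by omega), dif_pos (by omega)]

-- ===== VERDICT (by name: the statement is the Claim_ definition above) =====
theorem countGoodNumbers_spec : Claim_equal_countGoodNumbers := by
  intro n _
  unfold Spec_countGoodNumbers countGoodNumbers countGoodNumbers_alt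
  simp only [pvPow_bridge]
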